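-- pv_equiv track=rewrite | github.com/srillaert/binary-puzzles | solve.py | merge_row_with_permutation
-- ===== SOURCE A (Python) =====
-- def merge_row_with_permutation(row, permutation):
--     result = []
--     permutation_index = 0
--
--     for char in row:
--         if char == '.':
--             if permutation_index < len(permutation):
--                 result.append(permutation[permutation_index])
--                 permutation_index += 1
--             else:
--                 # If no more characters in permutation, keep the '.' as is
--                 result.append('.')
--         else:
--             result.append(char)
--
--     return result
-- ===== SOURCE B (Python) =====
-- def merge_row_with_permutation(row, permutation):
--     result = list(row)
--     dots = [i for i, c in enumerate(result) if c == '.']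
--     for i, p in zip(dots, permutation):
--         result[i] = p
--     return result
-- ===== Notes on version B (the rewrite author's own statement) =====
-- stated objective: alternative
-- what changed: Instead of A's single counter-driven scan that appends to a fresh list, B copies the row, builds an explicit index table of the dot positions, and zip-fills permutation characters into those positions in place.
import Mathlib
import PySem

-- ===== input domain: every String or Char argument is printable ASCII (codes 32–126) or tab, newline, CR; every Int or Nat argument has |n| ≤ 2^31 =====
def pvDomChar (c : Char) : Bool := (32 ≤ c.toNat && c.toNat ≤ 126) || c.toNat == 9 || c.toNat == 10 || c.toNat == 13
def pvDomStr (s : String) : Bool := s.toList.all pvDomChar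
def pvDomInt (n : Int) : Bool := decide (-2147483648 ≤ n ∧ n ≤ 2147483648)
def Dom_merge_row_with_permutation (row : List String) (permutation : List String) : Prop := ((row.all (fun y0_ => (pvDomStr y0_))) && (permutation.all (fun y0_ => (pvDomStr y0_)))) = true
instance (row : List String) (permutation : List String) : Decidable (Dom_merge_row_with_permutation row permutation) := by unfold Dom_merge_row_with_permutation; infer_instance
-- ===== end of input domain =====

-- B rebuilds the function as copy + explicit dot-position index table + zip-fill (alternative decomposition, same cost).

-- ===== PORT A =====
-- single scan with an accumulator list and a running permutation index;
-- permutation[permutation_index] is ported as getD — exact, since the guard ensures the index is in range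
def merge_row_with_permutation (row : List String) (permutation : List String) : List String :=
  (row.foldl
    (fun (st : List String × Nat) char =>
      if char == "." then
        if st.2 < permutation.length then
          (st.1 ++ [permutation.getD st.2 "."], st.2 + 1)
        else
          (st.1 ++ ["."], st.2)
      else
        (st.1 ++ [char], st.2))
    ([], 0)).1

-- ===== PORT B =====
-- list(row) copy; enumerate is ported as zipIdx (exact: Python's enumerate here yields indices 0,1,2,…);
-- then the zip-fill assigns into the copy
def merge_row_with_permutation_alt (row : List String) (permutation : List String) : List String :=
  let result := row
  let dots := (row.zipIdx).filterMap (fun ci => if ci.1 == "." then some ci.2 else none)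
  (dots.zip permutation).foldl (fun res ip => res.set ip.1 ip.2) result

-- ===== PRECONDITION & SPEC =====
def Spec_merge_row_with_permutation (row : List String) (permutation : List String) (out : List String) : Prop := out = merge_row_with_permutation_alt row permutation
instance (row : List String) (permutation : List String) (out : List String) : Decidable (Spec_merge_row_with_permutation row permutation out) := by unfold Spec_merge_row_with_permutation; infer_instance

-- ===== CLAIM (what is proved, stated in full; the proofs are below) =====
def Claim_equal_merge_row_with_permutation : Prop := ∀ (row : List String) (permutation : List String), Dom_merge_row_with_permutation row permutation → Spec_merge_row_with_permutation row permutation (merge_row_with_permutation row permutation)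

-- ===== LEMMAS AND PROOFS =====

-- common recursive characterisation both ports are reduced to
def mergeRec : List String → List String → List String
  | [], _ => []
  | c :: cs, perm =>
    if c = "." then
      match perm with
      | [] => "." :: mergeRec cs []
      | p :: ps => p :: mergeRec cs ps
    else c :: mergeRec cs perm

theorem mergeRec_nil_perm (row : List String) : mergeRec row [] = row := by
  induction row with
  | nil => rfl
  | cons c cs ih => by_cases h : c = "." <;> simp [mergeRec, h, ih]

-- A-side: the counter-driven foldl computes mergeRec on the not-yet-consumed permutation suffix
theorem foldA (permutation : List String) (row : List String) :
    ∀ (acc : List String) (k : Nat),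
    (row.foldl
      (fun (st : List String × Nat) char =>
        if char == "." then
          if st.2 < permutation.length then
            (st.1 ++ [permutation.getD st.2 "."], st.2 + 1)
          else
            (st.1 ++ ["."], st.2)
        else
          (st.1 ++ [char], st.2))
      (acc, k)).1 = acc ++ mergeRec row (permutation.drop k) := by
  induction row with
  | nil => intro acc k; simp [mergeRec]
  | cons c cs ih =>
    intro acc k
    by_cases hc : c = "."
    · by_cases hk : k < permutation.length
      · have hdrop : permutation.drop k = permutation[k] :: permutation.drop (k + 1) :=
          List.drop_eq_getElem_cons hk
        have hgd : permutation.getD k "." = permutation[k] := List.getD_eq_getElem _ _ hk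
        simp only [List.foldl_cons, hc, beq_self_eq_true, if_pos, hk]
        rw [ih, hdrop]
        simp [mergeRec, List.getD, List.getElem?_eq_getElem hk]
      · have hdrop : permutation.drop k = [] := by
          simp [List.drop_eq_nil_iff]; omega
        simp only [List.foldl_cons, hc, beq_self_eq_true, if_pos, hk, if_false]
        rw [ih, hdrop]
        simp [mergeRec]
    · have hb : (c == ".") = false := by simp [hc]
      simp only [List.foldl_cons, hb, Bool.false_eq_true, if_false]
      rw [ih]
      simp [mergeRec, hc]

theorem zipIdx_shift {α : Type} (cs : List α) : ∀ (n : Nat),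
    cs.zipIdx (n + 1) = (cs.zipIdx n).map (fun ci => (ci.1, ci.2 + 1)) := by
  induction cs with
  | nil => intro n; simp
  | cons c cs ih => intro n; simp [List.zipIdx_cons, ih (n + 1)]

-- setting at shifted positions commutes with cons
theorem fold_set_shift (L : List (Nat × String)) : ∀ (c : String) (res : List String),
    (L.map (fun ip => (ip.1 + 1, ip.2))).foldl (fun r ip => r.set ip.1 ip.2) (c :: res)
      = c :: L.foldl (fun r ip => r.set ip.1 ip.2) res := by
  induction L with
  | nil => intro c res; rfl
  | cons ip L ih => intro c res; simp [List.set, ih]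

def dotsOf (row : List String) : List Nat :=
  (row.zipIdx).filterMap (fun ci => if ci.1 == "." then some ci.2 else none)

theorem dotsOf_cons (c : String) (cs : List String) :
    dotsOf (c :: cs) = (if c = "." then [0] else []) ++ (dotsOf cs).map (· + 1) := by
  unfold dotsOf
  have hsw : cs.zipIdx.filterMap (fun x => if x.1 = "." then some (x.2 + 1) else none)
      = (cs.zipIdx.filterMap (fun x => if x.1 = "." then some x.2 else none)).map (· + 1) := by
    rw [List.map_filterMap]
    congr 1
    funext x
    by_cases hx : x.1 = "." <;> simp [hx]
  simp only [List.zipIdx_cons, zipIdx_shift cs 0, List.filterMap_cons, List.filterMap_map]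
  by_cases h : c = "." <;> simp [h, Function.comp] <;> exact hsw

theorem foldB (row : List String) : ∀ (perm : List String),
    ((dotsOf row).zip perm).foldl (fun r ip => r.set ip.1 ip.2) row = mergeRec row perm := by
  induction row with
  | nil => intro perm; simp [dotsOf, mergeRec]
  | cons c cs ih =>
    intro perm
    rw [dotsOf_cons]
    by_cases hc : c = "."
    · cases perm with
      | nil => simp [mergeRec, hc, mergeRec_nil_perm]
      | cons p ps =>
        simp only [hc, if_pos, List.singleton_append, List.zip_cons_cons, List.foldl_cons,
          List.zip_map_left, List.set]
        have := fold_set_shift ((dotsOf cs).zip ps) p cs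
        
        have hmap : (((dotsOf cs).zip ps).map (Prod.map (· + 1) id))
            = ((dotsOf cs).zip ps).map (fun ip => (ip.1 + 1, ip.2)) := by
          simp [Prod.map]
        rw [hmap, this, ih ps]
        simp [mergeRec]
    · simp only [hc, if_neg, not_false_iff, List.nil_append, List.zip_map_left]
      have := fold_set_shift ((dotsOf cs).zip perm) c cs
      have hmap : (((dotsOf cs).zip perm).map (Prod.map (· + 1) id))
          = ((dotsOf cs).zip perm).map (fun ip => (ip.1 + 1, ip.2)) := by
        simp [Prod.map]
      rw [hmap, this, ih perm]
      simp [mergeRec, hc]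

theorem portA_eq (row permutation : List String) :
    merge_row_with_permutation row permutation = mergeRec row permutation := by
  unfold merge_row_with_permutation
  rw [foldA permutation row [] 0]
  simp

theorem portB_eq (row permutation : List String) :
    merge_row_with_permutation_alt row permutation = mergeRec row permutation := by
  unfold merge_row_with_permutation_alt
  exact foldB row permutation

-- ===== VERDICT (by name: the statement is the Claim_ definition above) =====
theorem merge_row_with_permutation_spec : Claim_equal_merge_row_with_permutation := by
  intro row permutation _
  unfold Spec_merge_row_with_permutation
  rw [portA_eq, portB_eq]
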